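-- pv_equiv track=rewrite | github.com/Clarifai/pipeline-examples | code-review-pipeline/python-code-review-ps/1/llm_reviewer.py | _fallback_summary
-- ===== SOURCE A (Python) =====
-- from typing import Dict, List, Optional
--
-- def _fallback_summary(findings: List[dict]) -> str:
--     """Return a plain-text summary when the LLM is unavailable."""
--     if not findings:
--         return "✅ No issues found. Code passed all static analysis checks."
--
--     lines = [
--         "## Code Review (Static Analysis Only)\n",
--         f"Found **{len(findings)} issue(s)** across the reviewed files.\n",
--         "*LLM summarization was unavailable — showing raw findings.*\n",
--     ]
--
--     by_sev: Dict[str, list] = {}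
--     for f in findings:
--         by_sev.setdefault(f["severity"], []).append(f)
--
--     for sev in ("error", "warning", "convention", "refactor", "info"):
--         items = by_sev.get(sev, [])
--         if not items:
--             continue
--         lines.append(f"\n### {sev.upper()} ({len(items)})\n")
--         for item in items[:20]:
--             lines.append(
--                 f"- **{item['file']}:{item['line']}** "
--                 f"[{item['tool']}/{item['rule']}] {item['message']}"
--             )
--         if len(items) > 20:
--             lines.append(f"  ... and {len(items) - 20} more")
--
--     return "\n".join(lines)
-- ===== SOURCE B (Python) =====
-- def _fallback_summary(findings):
--     """Return a plain-text summary when the LLM is unavailable."""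
--     if not findings:
--         return "✅ No issues found. Code passed all static analysis checks."
--
--     lines = [
--         "## Code Review (Static Analysis Only)\n",
--         f"Found **{len(findings)} issue(s)** across the reviewed files.\n",
--         "*LLM summarization was unavailable — showing raw findings.*\n",
--     ]
--
--     # Sort-then-scan: stable-sort the relevant findings by severity rank,
--     # then emit one section per consecutive run of equal severity.
--     rank = {"error": 0, "warning": 1, "convention": 2, "refactor": 3, "info": 4}
--     ordered = sorted([f for f in findings if f["severity"] in rank],
--                      key=lambda f: rank[f["severity"]])
--     i, n = 0, len(ordered)
--     while i < n:
--         sev = ordered[i]["severity"]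
--         j = i
--         while j < n and ordered[j]["severity"] == sev:
--             j += 1
--         items = ordered[i:j]
--         lines.append(f"\n### {sev.upper()} ({len(items)})\n")
--         for item in items[:20]:
--             lines.append(
--                 f"- **{item['file']}:{item['line']}** "
--                 f"[{item['tool']}/{item['rule']}] {item['message']}"
--             )
--         if len(items) > 20:
--             lines.append(f"  ... and {len(items) - 20} more")
--         i = j
--     return "\n".join(lines)
-- ===== Notes on version B (the rewrite author's own statement) =====
-- stated objective: alternative
-- what changed: B replaces A's one-pass grouping dict with sort-then-scan: it stable-sorts the relevant findings by a fixed severity rank and then emits one section per consecutive run of equal severity; stability keeps input order within a severity, so the output is identical.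
import Mathlib
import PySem

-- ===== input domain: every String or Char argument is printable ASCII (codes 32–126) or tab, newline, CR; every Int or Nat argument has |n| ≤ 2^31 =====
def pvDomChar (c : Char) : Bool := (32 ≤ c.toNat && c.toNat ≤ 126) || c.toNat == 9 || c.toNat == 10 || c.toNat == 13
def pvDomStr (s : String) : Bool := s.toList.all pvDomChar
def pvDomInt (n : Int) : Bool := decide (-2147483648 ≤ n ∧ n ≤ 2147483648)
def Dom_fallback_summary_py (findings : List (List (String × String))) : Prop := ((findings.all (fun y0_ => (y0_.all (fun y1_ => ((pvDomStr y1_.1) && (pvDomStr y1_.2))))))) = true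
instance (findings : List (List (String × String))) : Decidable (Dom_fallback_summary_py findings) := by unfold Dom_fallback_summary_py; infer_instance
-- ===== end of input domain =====

-- B replaces A's grouping dict with sort-then-scan: stable-sort the relevant findings by a
-- fixed severity rank, then emit one section per consecutive run of equal severity.

-- shared helper: f[k] as a total Lean function (Python raises KeyError where the key is
-- missing; Pre_ excludes exactly those accesses, so the default "" is never observed)
def pvGet (f : List (String × String)) (k : String) : String :=
  ((PySem.Dict.mk f).get? k).getD ""

def pvSevs : List String := ["error", "warning", "convention", "refactor", "info"]

def pvHeader (findings : List (List (String × String))) : List String :=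
  ["## Code Review (Static Analysis Only)\n",
   "Found **" ++ PySem.Int.toStr (findings.length : Int) ++ " issue(s)** across the reviewed files.\n",
   "*LLM summarization was unavailable — showing raw findings.*\n"]

def pvItemLine (item : List (String × String)) : String :=
  "- **" ++ pvGet item "file" ++ ":" ++ pvGet item "line" ++ "** " ++
  "[" ++ pvGet item "tool" ++ "/" ++ pvGet item "rule" ++ "] " ++ pvGet item "message"

-- ===== PORT A =====
-- renders one severity section of A's loop (append header, first 20 item lines, '... more' tail)
def pvSection (ls : List String) (sev : String) (items : List (List (String × String))) : List String :=
  if items = [] then ls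
  else
    let ls := ls ++ ["\n### " ++ PySem.Str.upper sev ++ " (" ++ PySem.Int.toStr (items.length : Int) ++ ")\n"]
    let ls := (PySem.List.slice items none (some 20)).foldl (fun ls item => ls ++ [pvItemLine item]) ls
    if 20 < items.length then
      ls ++ ["  ... and " ++ PySem.Int.toStr ((items.length : Int) - 20) ++ " more"]
    else ls

def fallback_summary_py (findings : List (List (String × String))) : String :=
  if findings = [] then "✅ No issues found. Code passed all static analysis checks."
  else
    let bySev : PySem.Dict String (List (List (String × String))) :=
      findings.foldl (fun d f => d.modify (pvGet f "severity") [] (· ++ [f])) PySem.Dict.empty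
    let lines := pvSevs.foldl (fun ls sev => pvSection ls sev (bySev.getD sev [])) (pvHeader findings)
    PySem.Str.join "\n" lines

-- ===== PORT B =====
-- rank[f["severity"]]; the else-branch 5 encodes 'not in rank' (Python never evaluates it:
-- the comprehension keeps only findings whose severity is a key of rank, i.e. pvRank f < 5)
def pvRank (f : List (String × String)) : Int :=
  if pvGet f "severity" == "error" then 0
  else if pvGet f "severity" == "warning" then 1
  else if pvGet f "severity" == "convention" then 2
  else if pvGet f "severity" == "refactor" then 3
  else if pvGet f "severity" == "info" then 4
  else 5

-- the lines of one emitted section of B's outer while-loop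
def pvSectionLines (sev : String) (items : List (List (String × String))) : List String :=
  ("\n### " ++ PySem.Str.upper sev ++ " (" ++ PySem.Int.toStr (items.length : Int) ++ ")\n")
    :: (PySem.List.slice items none (some 20)).map pvItemLine
    ++ (if 20 < items.length then ["  ... and " ++ PySem.Int.toStr ((items.length : Int) - 20) ++ " more"] else [])

-- B's outer while-loop: items = ordered[i:j] is the maximal run of equal severity
-- (takeWhile = the inner 'while j < n and …: j += 1' scan; dropWhile = 'i = j')
def pvGroupRuns : List (List (String × String)) → List String
  | [] => []
  | f :: rest =>
    let sev := pvGet f "severity"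
    pvSectionLines sev (f :: rest.takeWhile (fun g => pvGet g "severity" == sev))
      ++ pvGroupRuns (rest.dropWhile (fun g => pvGet g "severity" == sev))
termination_by l => l.length
decreasing_by
  simpa using Nat.lt_succ_of_le (List.length_dropWhile_le _ _)

def fallback_summary_py_alt (findings : List (List (String × String))) : String :=
  if findings = [] then "✅ No issues found. Code passed all static analysis checks."
  else
    let ordered := PySem.List.sorted (findings.filter (fun f => pvRank f < 5)) pvRank
    PySem.Str.join "\n" (pvHeader findings ++ pvGroupRuns ordered)

-- ===== PRECONDITION & SPEC =====
-- Pre_ excludes exactly the inputs on which Python A raises KeyError: a finding without a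
-- "severity" key, or a displayed item (among the first 20 of a matched severity) missing
-- one of the "file"/"line"/"tool"/"rule"/"message" keys.
def Pre_fallback_summary_py (findings : List (List (String × String))) : Prop :=
  (∀ f ∈ findings, (PySem.Dict.mk f).contains "severity") ∧
  ∀ sev ∈ pvSevs,
    ∀ f ∈ (findings.filter (fun f => pvGet f "severity" == sev)).take 20,
      ∀ k ∈ (["file", "line", "tool", "rule", "message"] : List String),
        (PySem.Dict.mk f).contains k
instance (findings : List (List (String × String))) : Decidable (Pre_fallback_summary_py findings) := by unfold Pre_fallback_summary_py; infer_instance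

def pvWitness_fallback_summary_py : (List (List (String × String))) :=
  [[("severity", "error"), ("file", "a.py"), ("line", "3"), ("tool", "pylint"),
    ("rule", "E1"), ("message", "bad")],
   [("severity", "info"), ("file", "b.py"), ("line", "7"), ("tool", "flake8"),
    ("rule", "I0"), ("message", "note")]]

def Spec_fallback_summary_py (findings : List (List (String × String))) (out : String) : Prop := out = fallback_summary_py_alt findings
instance (findings : List (List (String × String))) (out : String) : Decidable (Spec_fallback_summary_py findings out) := by unfold Spec_fallback_summary_py; infer_instance

-- ===== CLAIM (what is proved, stated in full; the proofs are below) =====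
def Claim_equal_fallback_summary_py : Prop := ∀ (findings : List (List (String × String))), Dom_fallback_summary_py findings → Pre_fallback_summary_py findings → Spec_fallback_summary_py findings (fallback_summary_py findings)

-- ===== LEMMAS AND PROOFS =====

theorem pv_insertBy_append {α : Type} (before : α → α → Bool) (x : α)
    (L1 L2 : List α) (h : ∀ y ∈ L1, before x y = false) :
    PySem.List.insertBy before x (L1 ++ L2) = L1 ++ PySem.List.insertBy before x L2 := by
  induction L1 with
  | nil => simp
  | cons y ys ih =>
    simp only [List.cons_append, PySem.List.insertBy, h y (by simp)]
    simp [ih (fun z hz => h z (by simp [hz]))]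

theorem pv_insertBy_head_before {α : Type} (before : α → α → Bool) (x : α)
    (L : List α) (h : ∀ y ∈ L, before x y = true) :
    PySem.List.insertBy before x L = x :: L := by
  cases L with
  | nil => rfl
  | cons y ys => simp [PySem.List.insertBy, h y (by simp)]

theorem pv_insert_at {α : Type} (key : α → Int) (x : α) (L1 L2 : List α)
    (h1 : ∀ y ∈ L1, ¬ key x < key y) (h2 : ∀ y ∈ L2, key x < key y) :
    PySem.List.insertBy (fun a b => decide (key a < key b)) x (L1 ++ L2) = L1 ++ x :: L2 := by
  rw [pv_insertBy_append _ _ _ _ (fun y hy => by simpa using h1 y hy),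
      pv_insertBy_head_before _ _ _ (fun y hy => by simpa using h2 y hy)]

-- the stable sort by rank is the concatenation of the rank-classes in rank order
theorem pv_sorted_blocks {α : Type} (key : α → Int) (xs : List α)
    (h : ∀ x ∈ xs, key x = 0 ∨ key x = 1 ∨ key x = 2 ∨ key x = 3 ∨ key x = 4) :
    PySem.List.sorted xs key =
      xs.filter (fun x => key x == 0) ++ xs.filter (fun x => key x == 1) ++
      xs.filter (fun x => key x == 2) ++ xs.filter (fun x => key x == 3) ++
      xs.filter (fun x => key x == 4) := by
  have hk : ∀ (j : Int) (y : α), y ∈ xs.filter (fun y => key y == j) → key y = j := by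
    intro j y hy
    simpa using (List.mem_filter.mp hy).2
  induction xs using List.reverseRecOn with
  | nil => simp [PySem.List.sorted_eq_foldl_insertBy]
  | append_singleton xs x ih =>
    have hx := h x (by simp)
    have hxs : ∀ y ∈ xs, key y = 0 ∨ key y = 1 ∨ key y = 2 ∨ key y = 3 ∨ key y = 4 :=
      fun y hy => h y (by simp [hy])
    have hk' : ∀ (j : Int) (y : α), y ∈ xs.filter (fun y => key y == j) → key y = j := by
      intro j y hy
      simpa using (List.mem_filter.mp hy).2
    rw [PySem.List.sorted_eq_foldl_insertBy, List.foldl_append,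
      ← PySem.List.sorted_eq_foldl_insertBy, ih hxs (by
        intro j y hy
        exact hk' j y hy)]
    simp only [List.foldl_cons, List.foldl_nil, List.filter_append, List.filter_cons,
      List.filter_nil]
    rcases hx with hr | hr | hr | hr | hr
    · have := pv_insert_at key x (xs.filter (fun y => key y == 0))
        (xs.filter (fun y => key y == 1) ++ (xs.filter (fun y => key y == 2) ++
          (xs.filter (fun y => key y == 3) ++ xs.filter (fun y => key y == 4))))
        (by intro y hy; have := hk' 0 y hy; omega)
        (by intro y hy
            simp only [List.mem_append] at hy
            rcases hy with hy | hy | hy | hy <;>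
              [have := hk' 1 y hy; have := hk' 2 y hy; have := hk' 3 y hy; have := hk' 4 y hy] <;>
              omega)
      simp only [hr] at this ⊢
      simpa [List.append_assoc] using this
    · have := pv_insert_at key x
        (xs.filter (fun y => key y == 0) ++ xs.filter (fun y => key y == 1))
        (xs.filter (fun y => key y == 2) ++ (xs.filter (fun y => key y == 3) ++
          xs.filter (fun y => key y == 4)))
        (by intro y hy
            simp only [List.mem_append] at hy
            rcases hy with hy | hy <;> [have := hk' 0 y hy; have := hk' 1 y hy] <;> omega)
        (by intro y hy
            simp only [List.mem_append] at hy
            rcases hy with hy | hy | hy <;>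
              [have := hk' 2 y hy; have := hk' 3 y hy; have := hk' 4 y hy] <;> omega)
      simp only [hr] at this ⊢
      simpa [List.append_assoc] using this
    · have := pv_insert_at key x
        (xs.filter (fun y => key y == 0) ++ (xs.filter (fun y => key y == 1) ++
          xs.filter (fun y => key y == 2)))
        (xs.filter (fun y => key y == 3) ++ xs.filter (fun y => key y == 4))
        (by intro y hy
            simp only [List.mem_append] at hy
            rcases hy with hy | hy | hy <;>
              [have := hk' 0 y hy; have := hk' 1 y hy; have := hk' 2 y hy] <;> omega)
        (by intro y hy
            simp only [List.mem_append] at hy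
            rcases hy with hy | hy <;> [have := hk' 3 y hy; have := hk' 4 y hy] <;> omega)
      simp only [hr] at this ⊢
      simpa [List.append_assoc] using this
    · have := pv_insert_at key x
        (xs.filter (fun y => key y == 0) ++ (xs.filter (fun y => key y == 1) ++
          (xs.filter (fun y => key y == 2) ++ xs.filter (fun y => key y == 3))))
        (xs.filter (fun y => key y == 4))
        (by intro y hy
            simp only [List.mem_append] at hy
            rcases hy with hy | hy | hy | hy <;>
              [have := hk' 0 y hy; have := hk' 1 y hy; have := hk' 2 y hy; have := hk' 3 y hy] <;>
              omega)
        (by intro y hy; have := hk' 4 y hy; omega)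
      simp only [hr] at this ⊢
      simpa [List.append_assoc] using this
    · have := pv_insert_at key x
        (xs.filter (fun y => key y == 0) ++ (xs.filter (fun y => key y == 1) ++
          (xs.filter (fun y => key y == 2) ++ (xs.filter (fun y => key y == 3) ++
            xs.filter (fun y => key y == 4))))) []
        (by intro y hy
            simp only [List.mem_append] at hy
            rcases hy with hy | hy | hy | hy | hy <;>
              [have := hk' 0 y hy; have := hk' 1 y hy; have := hk' 2 y hy; have := hk' 3 y hy;
               have := hk' 4 y hy] <;> omega)
        (by intro y hy; simp at hy)
      simp only [hr] at this ⊢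
      simpa [List.append_assoc] using this

theorem pv_takeWhile_append {α : Type} (p : α → Bool) (L1 L2 : List α)
    (h1 : ∀ x ∈ L1, p x = true) (h2 : ∀ x ∈ L2, p x = false) :
    (L1 ++ L2).takeWhile p = L1 ∧ (L1 ++ L2).dropWhile p = L2 := by
  induction L1 with
  | nil =>
    cases L2 with
    | nil => simp
    | cons y ys => simp [h2 y (by simp)]
  | cons x xs ih =>
    have := ih (fun z hz => h1 z (by simp [hz])) 
    simp [h1 x (by simp), this.1, this.2]

-- run-grouping consumes exactly one block when the remainder has a different severity everywhere
theorem pv_groupRuns_block (sev : String) (B rest : List (List (String × String)))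
    (hB : ∀ f ∈ B, pvGet f "severity" = sev)
    (hrest : ∀ f ∈ rest, pvGet f "severity" ≠ sev) :
    pvGroupRuns (B ++ rest) =
      (if B = [] then [] else pvSectionLines sev B) ++ pvGroupRuns rest := by
  cases B with
  | nil => simp
  | cons b bs =>
    have hsev : pvGet b "severity" = sev := hB b (by simp)
    have htw := pv_takeWhile_append (fun g => pvGet g "severity" == sev) bs rest
      (fun z hz => by simpa using hB z (by simp [hz]))
      (fun z hz => by simpa using hrest z hz)
    rw [List.cons_append, pvGroupRuns]
    simp only [hsev, htw.1, htw.2]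
    simp

theorem pv_foldl_append_map {α : Type} (g : α → String) (ls : List String) (xs : List α) :
    xs.foldl (fun ls item => ls ++ [g item]) ls = ls ++ xs.map g := by
  induction xs generalizing ls with
  | nil => simp
  | cons x xs ih => simp [ih]

theorem pv_section_eq (ls : List String) (sev : String) (items : List (List (String × String))) :
    pvSection ls sev items = ls ++ (if items = [] then [] else pvSectionLines sev items) := by
  unfold pvSection pvSectionLines
  split_ifs with h h2 <;>
    simp [pv_foldl_append_map, ← List.flatMap_def, ← List.map_eq_flatMap, *]

-- A's grouping dict looked up at sev is exactly the direct filter of the findings list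
theorem pv_bySev_getD (findings : List (List (String × String))) (sev : String) :
    (findings.foldl (fun d f => d.modify (pvGet f "severity") [] (· ++ [f]))
        PySem.Dict.empty).getD sev []
      = findings.filter (fun f => pvGet f "severity" == sev) := by
  have h := PySem.Dict.getD_foldl_modify_append
    (l := findings.map (fun f => (pvGet f "severity", f)))
    (d := (PySem.Dict.empty : PySem.Dict String (List (List (String × String)))))
    (c := sev)
  rw [List.foldl_map] at h
  simpa [List.filter_map, Function.comp_def, List.map_map] using h

-- rank-class j of the rank-filtered list = severity-filter for the j-th severity
theorem pv_filter_rank (findings : List (List (String × String))) (j : Int) (s : String)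
    (hjs : (j = 0 ∧ s = "error") ∨ (j = 1 ∧ s = "warning") ∨ (j = 2 ∧ s = "convention") ∨
           (j = 3 ∧ s = "refactor") ∨ (j = 4 ∧ s = "info")) :
    (findings.filter (fun f => pvRank f < 5)).filter (fun f => pvRank f == j)
      = findings.filter (fun f => pvGet f "severity" == s) := by
  rw [List.filter_filter]
  apply List.filter_congr
  intro f _
  unfold pvRank
  rcases hjs with ⟨hj, hs⟩ | ⟨hj, hs⟩ | ⟨hj, hs⟩ | ⟨hj, hs⟩ | ⟨hj, hs⟩ <;> subst hj <;> subst hs <;>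
    split_ifs with h1 h2 h3 h4 h5 <;> simp_all

theorem pv_rank_mem (f : List (String × String)) (h : pvRank f < 5) :
    pvRank f = 0 ∨ pvRank f = 1 ∨ pvRank f = 2 ∨ pvRank f = 3 ∨ pvRank f = 4 := by
  unfold pvRank at h ⊢
  split_ifs at h ⊢ <;> omega

theorem fallback_summary_py_spec_aux (findings : List (List (String × String))) :
    fallback_summary_py findings = fallback_summary_py_alt findings := by
  unfold fallback_summary_py fallback_summary_py_alt
  by_cases hnil : findings = []
  · simp [hnil]
  simp only [if_neg hnil]
  congr 1
  -- A side: fold over the five severities, dict lookups rewritten to filters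
  rw [show pvSevs.foldl (fun ls sev => pvSection ls sev
        ((findings.foldl (fun d f => d.modify (pvGet f "severity") [] (· ++ [f]))
          PySem.Dict.empty).getD sev [])) (pvHeader findings)
      = pvSevs.foldl (fun ls sev => pvSection ls sev
          (findings.filter (fun f => pvGet f "severity" == sev))) (pvHeader findings) by
    simp only [pv_bySev_getD]]
  -- B side: sorted list = the five severity blocks in order
  have hblocks := pv_sorted_blocks pvRank (findings.filter (fun f => pvRank f < 5))
    (by intro f hf
        exact pv_rank_mem f (by simpa using (List.mem_filter.mp hf).2))
  rw [hblocks, pv_filter_rank findings 0 "error" (by simp),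
    pv_filter_rank findings 1 "warning" (by simp),
    pv_filter_rank findings 2 "convention" (by simp),
    pv_filter_rank findings 3 "refactor" (by simp),
    pv_filter_rank findings 4 "info" (by simp)]
  have hmem : ∀ (s : String) (f : List (String × String)),
      f ∈ findings.filter (fun f => pvGet f "severity" == s) → pvGet f "severity" = s := by
    intro s f hf
    simpa using (List.mem_filter.mp hf).2
  -- peel the five blocks off pvGroupRuns one at a time
  simp only [List.append_assoc]
  rw [pv_groupRuns_block "error" _ _ (hmem "error") (by
      intro f hf
      simp only [List.mem_append] at hf
      rcases hf with hf | hf | hf | hf <;>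
        [rw [hmem "warning" f hf]; rw [hmem "convention" f hf]; rw [hmem "refactor" f hf];
         rw [hmem "info" f hf]] <;> decide)]
  rw [pv_groupRuns_block "warning" _ _ (hmem "warning") (by
      intro f hf
      simp only [List.mem_append] at hf
      rcases hf with hf | hf | hf <;>
        [rw [hmem "convention" f hf]; rw [hmem "refactor" f hf]; rw [hmem "info" f hf]] <;> decide)]
  rw [pv_groupRuns_block "convention" _ _ (hmem "convention") (by
      intro f hf
      simp only [List.mem_append] at hf
      rcases hf with hf | hf <;> [rw [hmem "refactor" f hf]; rw [hmem "info" f hf]] <;> decide)]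
  rw [pv_groupRuns_block "refactor" _ _ (hmem "refactor") (by
      intro f hf
      rw [hmem "info" f hf]
      decide)]
  rw [show (findings.filter (fun f => pvGet f "severity" == "info")) =
      (findings.filter (fun f => pvGet f "severity" == "info")) ++ [] by simp,
    pv_groupRuns_block "info" _ [] (hmem "info") (by simp)]
  -- both sides are now header ++ the five optional sections
  simp [pvSevs, pv_section_eq, List.append_assoc, pvGroupRuns]

-- ===== VERDICT (by name: the statement is the Claim_ definition above) =====
theorem fallback_summary_py_spec : Claim_equal_fallback_summary_py := by
  intro findings _ _
  exact fallback_summary_py_spec_aux findings
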